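-- pv_equiv track=rewrite | github.com/at0m1ccc/PythonSkillbox | part_2(1)/module_9/task_5.py | sort_frequency_analysis
-- ===== SOURCE A (Python) =====
-- def sort_frequency_analysis(letter_count_dict):
--     sort_letter_count = {}
--     str_result = ''
--     for letter in letter_count_dict:
--         if letter_count_dict[letter] not in sort_letter_count:
--             sort_letter_count[letter_count_dict[letter]] = [letter]
--         else:
--             sort_letter_count[letter_count_dict[letter]].append(letter)
--     for letter_count in sorted(sort_letter_count.keys(), reverse=True):
--         for sym in sorted(sort_letter_count[letter_count]):
--             str_result += sym + ' ' + letter_count + '\n'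
--     return str_result
-- ===== SOURCE B (Python) =====
-- def sort_frequency_analysis(letter_count_dict):
--     rows = sorted(letter_count_dict.items(), key=lambda kv: kv[0])
--     rows = sorted(rows, key=lambda kv: kv[1], reverse=True)
--     return ''.join(letter + ' ' + count + '\n' for letter, count in rows)
-- ===== Notes on version B (the rewrite author's own statement) =====
-- stated objective: simpler
-- what changed: Replaces A's count-keyed bucketing dict plus nested sorted loops and string accumulation by two stable sorts of the items (by letter ascending, then by count-string descending) followed by a single join.
import Mathlib
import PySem

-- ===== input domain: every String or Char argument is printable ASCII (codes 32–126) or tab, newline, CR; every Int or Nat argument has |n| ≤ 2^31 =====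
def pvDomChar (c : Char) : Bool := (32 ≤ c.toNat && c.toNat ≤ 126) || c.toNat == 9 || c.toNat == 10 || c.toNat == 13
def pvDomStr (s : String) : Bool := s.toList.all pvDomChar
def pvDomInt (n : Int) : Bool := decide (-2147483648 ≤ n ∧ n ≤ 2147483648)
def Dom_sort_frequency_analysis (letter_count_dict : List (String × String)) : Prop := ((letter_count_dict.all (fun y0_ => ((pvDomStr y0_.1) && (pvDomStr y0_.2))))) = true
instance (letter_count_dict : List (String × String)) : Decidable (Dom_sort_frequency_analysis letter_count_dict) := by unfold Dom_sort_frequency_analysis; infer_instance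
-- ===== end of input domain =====

-- B replaces A's count-keyed bucketing dict and nested sorted loops by two stable sorts of the
-- items (letter ascending, then count-string descending) followed by one join: simpler, same cost.

-- ===== PORT A =====
-- 'for letter in letter_count_dict' iterates the dict's (key, value) pairs in insertion order;
-- 'letter_count_dict[letter]' is each pair's own value.
def sort_frequency_analysis (letter_count_dict : List (String × String)) : String :=
  let slc : PySem.Dict String (List String) :=
    letter_count_dict.foldl
      (fun d kv =>
        if d.contains kv.2 = false then d.insert kv.2 [kv.1]
        else d.modify kv.2 [] (fun ls => ls ++ [kv.1]))
      PySem.Dict.empty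
  (PySem.List.sorted slc.keys (fun k => k) true).foldl
    (fun s c =>
      (PySem.List.sorted (slc.getD c []) (fun x => x) false).foldl
        (fun s sym => s ++ sym ++ " " ++ c ++ "\n") s)
    ""

-- ===== PORT B =====
def sort_frequency_analysis_alt (letter_count_dict : List (String × String)) : String :=
  let byLetter := PySem.List.sorted letter_count_dict (fun kv => kv.1) false
  let rows := PySem.List.sorted byLetter (fun kv => kv.2) true
  PySem.Str.join "" (rows.map (fun kv => kv.1 ++ " " ++ kv.2 ++ "\n"))

-- ===== PRECONDITION & SPEC =====
def Spec_sort_frequency_analysis (letter_count_dict : List (String × String)) (out : String) : Prop := out = sort_frequency_analysis_alt letter_count_dict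
instance (letter_count_dict : List (String × String)) (out : String) : Decidable (Spec_sort_frequency_analysis letter_count_dict out) := by unfold Spec_sort_frequency_analysis; infer_instance

-- ===== CLAIM (what is proved, stated in full; the proofs are below) =====
def Claim_equal_sort_frequency_analysis : Prop := ∀ (letter_count_dict : List (String × String)), Dom_sort_frequency_analysis letter_count_dict → Spec_sort_frequency_analysis letter_count_dict (sort_frequency_analysis letter_count_dict)

-- ===== LEMMAS AND PROOFS =====

-- One output row, and a fold producing the whole output from a list of rows.
def pvRow (kv : String × String) : String := kv.1 ++ " " ++ kv.2 ++ "\n"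
def pvStrOf (rows : List (String × String)) : String :=
  rows.foldl (fun s kv => s ++ pvRow kv) ""

-- The output order: count-string descending, then letter ascending.
def pvR (a b : String × String) : Prop := b.2 < a.2 ∨ (a.2 = b.2 ∧ a.1 ≤ b.1)

-- A's grouping dict, rewritten as a pure 'modify' fold over the swapped pairs.
def pvDict (lcd : List (String × String)) : PySem.Dict String (List String) :=
  (lcd.map (fun kv => (kv.2, kv.1))).foldl
    (fun d p => d.modify p.1 [] (fun ls => ls ++ [p.2])) PySem.Dict.empty

-- The row lists the two programs emit.
def pvRowsA (lcd : List (String × String)) : List (String × String) :=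
  (PySem.List.sorted (pvDict lcd).keys (fun k => k) true).flatMap
    (fun c => (PySem.List.sorted ((pvDict lcd).getD c []) (fun x => x) false).map (fun l => (l, c)))
def pvRowsB (lcd : List (String × String)) : List (String × String) :=
  PySem.List.sorted (PySem.List.sorted lcd (fun kv => kv.1) false) (fun kv => kv.2) true

lemma pvDict_eq (lcd : List (String × String)) :
    lcd.foldl
      (fun d kv =>
        if d.contains kv.2 = false then d.insert kv.2 [kv.1]
        else d.modify kv.2 [] (fun ls => ls ++ [kv.1]))
      PySem.Dict.empty = pvDict lcd := by
  unfold pvDict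
  rw [List.foldl_map]
  refine PySem.List.foldl_congr_mem _ _ _ _ ?_
  intro d kv _
  by_cases h : d.contains kv.2 = true
  · simp [h]
  · simp only [Bool.not_eq_true] at h
    simp [h, PySem.Dict.modify, PySem.Dict.getD_of_not_contains _ _ h]

lemma pvDict_keys (lcd : List (String × String)) :
    (pvDict lcd).keys = PySem.Set.ofList (lcd.map (fun kv => kv.2)) := by
  unfold pvDict
  rw [PySem.Dict.keys_foldl_modify_key (lcd.map (fun kv => (kv.2, kv.1))) Prod.fst []
        (fun _ p => (fun ls => ls ++ [p.2])) PySem.Dict.empty]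
  simp [PySem.Set.update_nil_left, List.map_map, Function.comp_def]

lemma pvDict_getD (lcd : List (String × String)) (c : String) :
    (pvDict lcd).getD c [] = (lcd.filter (fun kv => kv.2 == c)).map (fun kv => kv.1) := by
  unfold pvDict
  rw [PySem.Dict.getD_foldl_modify_append]
  simp [List.filter_map, List.map_map, Function.comp_def]

-- A's nested string loop over counts and letters is the row fold over its flatMap row list.
lemma pvFoldl_rows (C : List String) (g : String → List String) (s : String) :
    C.foldl
      (fun s c => (g c).foldl (fun s sym => s ++ sym ++ " " ++ c ++ "\n") s) s
    = (C.flatMap (fun c => (g c).map (fun l => (l, c)))).foldl (fun s kv => s ++ pvRow kv) s := by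
  induction C generalizing s with
  | nil => rfl
  | cons c C ih =>
    simp only [List.foldl_cons, List.flatMap_cons, List.foldl_append, List.foldl_map, ih]
    congr 1
    refine PySem.List.foldl_congr_mem _ _ _ _ ?_
    intro acc x _
    simp [pvRow, String.append_assoc]

lemma pvA_eq (lcd : List (String × String)) :
    sort_frequency_analysis lcd = pvStrOf (pvRowsA lcd) := by
  unfold sort_frequency_analysis pvStrOf pvRowsA
  rw [pvDict_eq, pvFoldl_rows]

lemma pvChars_join_nil (L : List (List Char)) : PySem.Chars.join [] L = L.flatten := by
  induction L with
  | nil => rfl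
  | cons a L ih =>
    cases L with
    | nil => simp [PySem.Chars.join, List.intercalate]
    | cons b L => simp_all [PySem.Chars.join_cons_cons]

lemma pvFoldl_append_toList (parts : List String) (a : String) :
    (parts.foldl (· ++ ·) a).toList = a.toList ++ (parts.map String.toList).flatten := by
  induction parts generalizing a with
  | nil => simp
  | cons p parts ih => simp [ih, String.toList_append]

lemma pvB_eq (lcd : List (String × String)) :
    sort_frequency_analysis_alt lcd = pvStrOf (pvRowsB lcd) := by
  unfold sort_frequency_analysis_alt pvStrOf pvRowsB
  apply String.toList_inj.mp
  rw [PySem.Str.toList_join, show ("" : String).toList = [] from rfl, pvChars_join_nil,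
      ← List.foldl_map (f := pvRow) (g := fun s t => s ++ t), pvFoldl_append_toList]
  simp only [List.map_map]
  rfl

-- pvR is antisymmetric on pairs.
lemma pvR_antisymm (a b : String × String) (h1 : pvR a b) (h2 : pvR b a) : a = b := by
  rcases h1 with h1 | ⟨h1e, h1l⟩ <;> rcases h2 with h2 | ⟨h2e, h2l⟩
  · exact absurd (lt_trans h1 h2) (lt_irrefl _)
  · exact absurd h1 (by simp [h2e])
  · exact absurd h2 (by simp [h1e])
  · exact Prod.ext (le_antisymm h1l h2l) h1e

-- Partition permutation: concatenating the filters over the distinct keys recovers the list.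
lemma pvPart_perm (C : List String) (xs : List (String × String))
    (hC : C.Nodup) (hall : ∀ x ∈ xs, x.2 ∈ C) :
    (C.flatMap (fun c => xs.filter (fun kv => kv.2 == c))).Perm xs := by
  induction C generalizing xs with
  | nil =>
    cases xs with
    | nil => simp
    | cons x xs => exact absurd (hall x (by simp)) (by simp)
  | cons c C ih =>
    rw [List.flatMap_cons]
    have htail : ∀ c' ∈ C, xs.filter (fun kv => kv.2 == c')
        = (xs.filter (fun kv => !(kv.2 == c))).filter (fun kv => kv.2 == c') := by
      intro c' hc'
      rw [List.filter_filter]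
      refine List.filter_congr ?_
      intro kv _
      by_cases h : kv.2 = c'
      · have hcc : ¬ c' = c := by rintro rfl; exact (List.nodup_cons.mp hC).1 hc'
        simp [h, hcc]
      · simp [h]
    have hperm : (C.flatMap (fun c' => xs.filter (fun kv => kv.2 == c'))).Perm
        (xs.filter (fun kv => !(kv.2 == c))) := by
      rw [List.flatMap_congr htail]
      refine ih (xs.filter (fun kv => !(kv.2 == c))) (List.nodup_cons.mp hC).2 ?_
      intro x hx
      have hmem := hall x (List.mem_of_mem_filter hx)
      have hne := List.of_mem_filter hx
      simp only [Bool.not_eq_true', beq_eq_false_iff_ne, ne_eq] at hne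
      rcases List.mem_cons.mp hmem with h | h
      · exact absurd h hne
      · exact h
    exact (hperm.append_left _).trans (List.filter_append_perm (fun kv => kv.2 == c) xs)

lemma pvRowsA_perm (lcd : List (String × String)) : (pvRowsA lcd).Perm lcd := by
  unfold pvRowsA
  refine (List.Perm.flatMap (f := fun c => (PySem.List.sorted ((pvDict lcd).getD c []) (fun x => x) false).map (fun l => (l, c)))
      (g := fun c => ((pvDict lcd).getD c []).map (fun l => (l, c)))
      (PySem.List.sorted_perm _ _ _) (fun c _ => List.Perm.map _ (PySem.List.sorted_perm _ _ _))).trans ?_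
  have h2 : (pvDict lcd).keys.flatMap (fun c => ((pvDict lcd).getD c []).map (fun l => (l, c)))
      = (pvDict lcd).keys.flatMap (fun c => lcd.filter (fun kv => kv.2 == c)) := by
    refine List.flatMap_congr ?_
    intro c _
    rw [pvDict_getD, List.map_map]
    have hid : ∀ kv ∈ lcd.filter (fun kv => kv.2 == c),
        ((fun l => (l, c)) ∘ fun kv => kv.1) kv = id kv := by
      intro kv hkv
      have hc := List.of_mem_filter hkv
      obtain ⟨a, b⟩ := kv
      simp only [beq_iff_eq] at hc
      simp [hc]
    rw [List.map_congr_left hid, List.map_id]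
  rw [h2, pvDict_keys]
  exact pvPart_perm _ _ (PySem.Set.nodup_ofList _)
    (fun x hx => (PySem.Set.mem_ofList _ _).mpr (List.mem_map_of_mem hx))

lemma pvRowsB_perm (lcd : List (String × String)) : (pvRowsB lcd).Perm lcd :=
  (PySem.List.sorted_perm _ _ _).trans (PySem.List.sorted_perm _ _ _)

lemma pvRowsA_pairwise (lcd : List (String × String)) : (pvRowsA lcd).Pairwise pvR := by
  unfold pvRowsA
  rw [List.flatMap_def]
  refine List.pairwise_flatten.mpr ⟨?_, ?_⟩
  · intro l hl
    obtain ⟨c, _, rfl⟩ := List.mem_map.mp hl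
    refine List.pairwise_map.mpr ?_
    exact (PySem.List.sorted_pairwise _ _).imp (fun h => Or.inr ⟨rfl, h⟩)
  · refine List.pairwise_map.mpr ?_
    have hnd : (PySem.List.sorted (pvDict lcd).keys (fun k => k) true).Nodup := by
      rw [(PySem.List.sorted_perm _ _ _).nodup_iff, pvDict_keys]
      exact PySem.Set.nodup_ofList _
    refine ((PySem.List.sorted_pairwise_rev _ _).and hnd).imp ?_
    rintro c1 c2 ⟨hle, hne⟩ x hx y hy
    obtain ⟨lx, _, rfl⟩ := List.mem_map.mp hx
    obtain ⟨ly, _, rfl⟩ := List.mem_map.mp hy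
    exact Or.inl (lt_of_le_of_ne hle (fun h => hne h.symm))

-- Stability of the reverse insertion sort: one insertion keeps the tie order.
lemma pvInsertBy_pairwise (key : String × String → String) (P : String × String → String × String → Prop)
    (x : String × String) (ys : List (String × String))
    (h : ys.Pairwise (fun a b => key b < key a ∨ (key a = key b ∧ P a b)))
    (hx : ∀ y ∈ ys, key y = key x → P y x) :
    (PySem.List.insertBy (fun a b => decide (key b < key a)) x ys).Pairwise
      (fun a b => key b < key a ∨ (key a = key b ∧ P a b)) := by
  induction ys with
  | nil => simp [PySem.List.insertBy]
  | cons y ys ih =>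
    by_cases hb : key y < key x
    · have heq : PySem.List.insertBy (fun a b => decide (key b < key a)) x (y :: ys) = x :: y :: ys := by
        simp [PySem.List.insertBy, hb]
      rw [heq]
      refine List.Pairwise.cons ?_ h
      intro z hz
      rcases List.mem_cons.mp hz with rfl | hz
      · exact Or.inl hb
      · rcases List.rel_of_pairwise_cons h hz with hlt | ⟨heq', _⟩
        · exact Or.inl (hlt.trans hb)
        · exact Or.inl (heq' ▸ hb)
    · have heq : PySem.List.insertBy (fun a b => decide (key b < key a)) x (y :: ys)
          = y :: PySem.List.insertBy (fun a b => decide (key b < key a)) x ys := by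
        simp [PySem.List.insertBy, hb]
      rw [heq]
      refine List.Pairwise.cons ?_
        (ih (List.pairwise_cons.mp h).2 (fun y' hy' hk => hx y' (List.mem_cons_of_mem _ hy') hk))
      intro z hz
      rcases (PySem.List.mem_insertBy _ _ _ _).mp hz with rfl | hz
      · rcases lt_or_eq_of_le (not_lt.mp hb) with hlt | heq'
        · exact Or.inl hlt
        · exact Or.inr ⟨heq'.symm, hx y (List.mem_cons_self) heq'.symm⟩
      · exact (List.pairwise_cons.mp h).1 z hz

lemma pvFoldl_insertBy_pairwise (key : String × String → String)
    (P : String × String → String × String → Prop)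
    (xs ys : List (String × String))
    (hys : ys.Pairwise (fun a b => key b < key a ∨ (key a = key b ∧ P a b)))
    (hxs : xs.Pairwise (fun a b => key a = key b → P a b))
    (hcross : ∀ y ∈ ys, ∀ x ∈ xs, key y = key x → P y x) :
    (xs.foldl (fun acc x => PySem.List.insertBy (fun a b => decide (key b < key a)) x acc) ys).Pairwise
      (fun a b => key b < key a ∨ (key a = key b ∧ P a b)) := by
  induction xs generalizing ys with
  | nil => exact hys
  | cons x xs ih =>
    rw [List.foldl_cons]
    refine ih _
      (pvInsertBy_pairwise key P x ys hys (fun y hy => hcross y hy x (List.mem_cons_self)))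
      (List.pairwise_cons.mp hxs).2 ?_
    intro y hy x' hx' hk
    rcases (PySem.List.mem_insertBy _ _ _ _).mp hy with rfl | hy
    · exact (List.pairwise_cons.mp hxs).1 x' hx' hk
    · exact hcross y hy x' (List.mem_cons_of_mem _ hx') hk

lemma pvRowsB_pairwise (lcd : List (String × String)) : (pvRowsB lcd).Pairwise pvR := by
  unfold pvRowsB
  rw [PySem.List.sorted_rev_eq_foldl_insertBy]
  exact pvFoldl_insertBy_pairwise (fun kv => kv.2) (fun a b => a.1 ≤ b.1) _ []
    List.Pairwise.nil
    ((PySem.List.sorted_pairwise lcd (fun kv => kv.1)).imp (fun h => fun _ => h))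
    (fun y hy => absurd hy (List.not_mem_nil))

lemma pvRows_eq (lcd : List (String × String)) : pvRowsA lcd = pvRowsB lcd :=
  List.Perm.eq_of_pairwise (fun a b _ _ => pvR_antisymm a b)
    (pvRowsA_pairwise lcd) (pvRowsB_pairwise lcd)
    ((pvRowsA_perm lcd).trans (pvRowsB_perm lcd).symm)

-- ===== VERDICT (by name: the statement is the Claim_ definition above) =====
theorem sort_frequency_analysis_spec : Claim_equal_sort_frequency_analysis := by
  intro lcd _
  unfold Spec_sort_frequency_analysis
  rw [pvA_eq, pvB_eq, pvRows_eq]
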